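-- pv_equiv track=rewrite | github.com/child-lab-uj/child-lab-framework | child_lab_framework/core/flow/compilation.py | topological_order_from_root
-- ===== SOURCE A (Python) =====
-- def topological_order_from_root(
--     inputs: set[str],
--     dependencies: dict[str, tuple[str, ...]],
--     root: str,
--     visited: dict[str, bool]
-- ) -> list[str]:
--     if (
--         visited.get(root) is True or
--         root in inputs
--     ):
--         return []
--
--     if root not in dependencies:
--         # TODO: warn about dead component
--         return []
--
--     visited[root] = True
--
--     return sum(
--         (
--             topological_order_from_root(
--                 inputs,
--                 dependencies,
--                 dependency,
--                 visited
--             )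
--             for dependency
--             in dependencies[root]
--         ),
--         start=[]
--     ) + [root]
-- ===== SOURCE B (Python) =====
-- def topological_order_from_root(
--     inputs: set,
--     dependencies: dict,
--     root: str,
--     visited: dict
-- ) -> list:
--     out = []
--     stack = [("pre", root)]
--     while stack:
--         state, node = stack.pop()
--         if state == "post":
--             out.append(node)
--             continue
--         if visited.get(node) is True or node in inputs:
--             continue
--         if node not in dependencies:
--             continue
--         visited[node] = True
--         stack.append(("post", node))
--         for dep in reversed(dependencies[node]):
--             stack.append(("pre", dep))
--     return out
-- ===== Notes on version B (the rewrite author's own statement) =====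
-- stated objective: alternative
-- what changed: Replaced the recursive DFS (recursion + generator-sum list concatenation) by an iterative DFS over an explicit stack of pre/post markers that appends each node to the output when its post marker pops.
import Mathlib
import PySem

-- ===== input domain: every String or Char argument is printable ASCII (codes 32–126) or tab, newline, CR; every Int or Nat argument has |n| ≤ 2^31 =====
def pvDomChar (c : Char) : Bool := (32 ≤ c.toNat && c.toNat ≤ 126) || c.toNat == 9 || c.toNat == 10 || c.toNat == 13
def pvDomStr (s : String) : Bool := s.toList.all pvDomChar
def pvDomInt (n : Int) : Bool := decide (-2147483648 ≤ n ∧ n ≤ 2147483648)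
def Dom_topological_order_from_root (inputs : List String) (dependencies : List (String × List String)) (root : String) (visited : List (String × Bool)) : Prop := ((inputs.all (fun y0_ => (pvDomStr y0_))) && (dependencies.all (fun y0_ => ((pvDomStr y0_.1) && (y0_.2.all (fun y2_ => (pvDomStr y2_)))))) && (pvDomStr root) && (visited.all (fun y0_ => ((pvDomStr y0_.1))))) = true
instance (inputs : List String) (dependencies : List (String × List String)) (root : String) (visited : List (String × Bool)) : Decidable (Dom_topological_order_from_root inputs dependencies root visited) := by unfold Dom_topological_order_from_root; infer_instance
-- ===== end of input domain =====

-- B replaces A's recursive DFS by an iterative DFS over an explicit stack of pre/post markers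
-- (same traversal, no recursion). Both Pythons mutate `visited` identically; the equivalence
-- proved here is about the RETURN value (the ports thread the visited dict and return the list).

-- ===== PORT A =====
-- A's recursion terminates because each recursive layer marks a fresh dependency key visited;
-- the port makes that a fuel parameter seeded with dependencies.length + 1, which the proof
-- shows is always sufficient (fuel ≥ 1 + number of not-yet-True keys at every call).
mutual
-- recursive body of A: first the two guard returns, then mark visited, then the generator sum over the children, then ++ [root]
def goA (inputs : List String) (dependencies : List (String × List String)) : Nat → String → PySem.Dict String Bool → (List String × PySem.Dict String Bool)
  | 0, _, v => ([], v)
  | (fuel+1), root, v =>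
    if PySem.Dict.get? v root == some true || inputs.contains root then ([], v)
    else
      match PySem.Dict.get? (PySem.Dict.mk dependencies) root with
      | none => ([], v)
      | some ds =>
        let v1 := PySem.Dict.insert v root true
        let r := goAList inputs dependencies fuel ds v1
        (r.1 ++ [root], r.2)
  termination_by fuel _ _ => (fuel, 0)

-- sum((topological_order_from_root(..., dependency, visited) for dependency in dependencies[root]), start=[])
def goAList (inputs : List String) (dependencies : List (String × List String)) : Nat → List String → PySem.Dict String Bool → (List String × PySem.Dict String Bool)
  | _, [], v => ([], v)
  | fuel, d :: rest, v =>
      let r1 := goA inputs dependencies fuel d v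
      let r2 := goAList inputs dependencies fuel rest r1.2
      (r1.1 ++ r2.1, r2.2)
  termination_by fuel ds _ => (fuel, ds.length + 1)
end

def topological_order_from_root (inputs : List String) (dependencies : List (String × List String)) (root : String) (visited : List (String × Bool)) : List String :=
  (goA inputs dependencies (dependencies.length + 1) root (PySem.Dict.mk visited)).1

-- ===== PORT B =====
-- the ("pre", node) / ("post", node) stack entries of Source B
inductive PVItem where
  | pre : String → PVItem
  | post : String → PVItem
deriving DecidableEq, Repr

-- termination measure for B's while loop: number of dependency entries not yet marked True
def unvisA (dependencies : List (String × List String)) (v : PySem.Dict String Bool) : Nat :=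
  dependencies.countP (fun p => !(PySem.Dict.get? v p.1 == some true))

-- generic strict countP bound, used only by runB's termination proof
lemma countP_lt_of_witness {α : Type} (l : List α) (p q : α → Bool)
    (h : ∀ a ∈ l, q a = true → p a = true)
    (x : α) (hx : x ∈ l) (hpx : p x = true) (hqx : q x = false) :
    l.countP q < l.countP p := by
  induction l with
  | nil => cases hx
  | cons a t ih =>
    rcases List.mem_cons.mp hx with rfl | hxt
    · have hle : t.countP q ≤ t.countP p :=
        List.countP_mono_left (fun a ha => h a (List.mem_cons_of_mem _ ha))
      simp [hpx, hqx]; omega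
    · have hlt : t.countP q < t.countP p :=
        ih (fun a ha => h a (List.mem_cons_of_mem _ ha)) hxt
      have hhead : q a = true → p a = true := h a List.mem_cons_self
      by_cases hqa : q a = true
      · simp [hqa, hhead hqa]; omega
      · simp at hqa
        simp [List.countP_cons, hqa]
        by_cases hpa : p a = true <;> simp [hpa] <;> omega

-- used by runB's decreasing_by: marking a present, not-yet-True key strictly shrinks the measure
lemma unvis_insert_lt (dependencies : List (String × List String)) (v : PySem.Dict String Bool)
    (n : String) (ds : List String)
    (h2 : PySem.Dict.get? (PySem.Dict.mk dependencies) n = some ds)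
    (h1 : (PySem.Dict.get? v n == some true) = false) :
    unvisA dependencies (PySem.Dict.insert v n true) < unvisA dependencies v := by
  have hmem : n ∈ (PySem.Dict.mk dependencies).keys := by
    by_contra hn
    rw [← PySem.Dict.get?_eq_none_iff_not_mem_keys] at hn
    simp [hn] at h2
  have hkeys : ∃ a ∈ dependencies, a.1 = n := by
    simpa [PySem.Dict.keys_mk, List.mem_map] using hmem
  obtain ⟨a, ha, han⟩ := hkeys
  refine countP_lt_of_witness _ _ _ ?hh a ha ?hp ?hq
  case hh =>
    intro b hb hq
    by_cases hbn : b.1 = n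
    · simp [hbn] at hq
    · simpa [PySem.Dict.get?_insert, hbn] using hq
  case hp => simp [h1, han]
  case hq => simp [han]

-- Source B's while loop: stack head = top of stack; pushing children in reverse order in Python
-- is prepending them in order here
def runB (inputs : List String) (dependencies : List (String × List String)) : List PVItem → PySem.Dict String Bool → List String → List String
  | [], _, acc => acc
  | PVItem.post n :: K, v, acc => runB inputs dependencies K v (acc ++ [n])
  | PVItem.pre n :: K, v, acc =>
    if h1 : (PySem.Dict.get? v n == some true || inputs.contains n) = true then
      runB inputs dependencies K v acc
    else
      match h2 : PySem.Dict.get? (PySem.Dict.mk dependencies) n with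
      | none => runB inputs dependencies K v acc
      | some ds =>
          runB inputs dependencies (ds.map PVItem.pre ++ PVItem.post n :: K) (PySem.Dict.insert v n true) acc
  termination_by K v _ => (unvisA dependencies v, K.length)
  decreasing_by
  · exact Prod.Lex.right _ (by simp)
  · exact Prod.Lex.right _ (by simp)
  · exact Prod.Lex.right _ (by simp)
  · exact Prod.Lex.left _ _ (unvis_insert_lt dependencies v n ds h2 (by simp at h1; simp [h1.1]))

def topological_order_from_root_alt (inputs : List String) (dependencies : List (String × List String)) (root : String) (visited : List (String × Bool)) : List String :=
  runB inputs dependencies [PVItem.pre root] (PySem.Dict.mk visited) []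

-- ===== PRECONDITION & SPEC =====
def Spec_topological_order_from_root (inputs : List String) (dependencies : List (String × List String)) (root : String) (visited : List (String × Bool)) (out : List String) : Prop := out = topological_order_from_root_alt inputs dependencies root visited
instance (inputs : List String) (dependencies : List (String × List String)) (root : String) (visited : List (String × Bool)) (out : List String) : Decidable (Spec_topological_order_from_root inputs dependencies root visited out) := by unfold Spec_topological_order_from_root; infer_instance

-- ===== CLAIM (what is proved, stated in full; the proofs are below) =====
def Claim_equal_topological_order_from_root : Prop := ∀ (inputs : List String) (dependencies : List (String × List String)) (root : String) (visited : List (String × Bool)), Dom_topological_order_from_root inputs dependencies root visited → Spec_topological_order_from_root inputs dependencies root visited (topological_order_from_root inputs dependencies root visited)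

-- ===== LEMMAS AND PROOFS =====
lemma goA_zero (i : List String) (d : List (String × List String)) (r : String) (v : PySem.Dict String Bool) : goA i d 0 r v = ([], v) := by simp [goA]
lemma goA_skip (i : List String) (d : List (String × List String)) (fuel : Nat) (r : String) (v : PySem.Dict String Bool)
    (h : v.get? r = some true ∨ r ∈ i) : goA i d (fuel+1) r v = ([], v) := by
  rcases h with h | h <;> simp [goA, h]
lemma goA_dead (i : List String) (d : List (String × List String)) (fuel : Nat) (r : String) (v : PySem.Dict String Bool)
    (h1 : ¬ v.get? r = some true) (hni : r ∉ i) (h2 : PySem.Dict.get? (PySem.Dict.mk d) r = none) :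
    goA i d (fuel+1) r v = ([], v) := by simp [goA, h1, hni, h2]
lemma goA_mark (i : List String) (d : List (String × List String)) (fuel : Nat) (r : String) (v : PySem.Dict String Bool) (ds : List String)
    (h1 : ¬ v.get? r = some true) (hni : r ∉ i) (h2 : PySem.Dict.get? (PySem.Dict.mk d) r = some ds) :
    goA i d (fuel+1) r v = ((goAList i d fuel ds (v.insert r true)).1 ++ [r], (goAList i d fuel ds (v.insert r true)).2) := by
  simp [goA, h1, hni, h2]
lemma goAList_nil (i : List String) (d : List (String × List String)) (fuel : Nat) (v : PySem.Dict String Bool) :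
    goAList i d fuel [] v = ([], v) := by simp [goAList]
lemma goAList_cons (i : List String) (d : List (String × List String)) (fuel : Nat) (x : String) (rest : List String) (v : PySem.Dict String Bool) :
    goAList i d fuel (x :: rest) v =
      ((goA i d fuel x v).1 ++ (goAList i d fuel rest (goA i d fuel x v).2).1,
       (goAList i d fuel rest (goA i d fuel x v).2).2) := by simp [goAList]
lemma runB_nil (i : List String) (d : List (String × List String)) (v : PySem.Dict String Bool) (acc : List String) :
    runB i d [] v acc = acc := by simp [runB]
lemma runB_post (i : List String) (d : List (String × List String)) (n : String) (K : List PVItem) (v : PySem.Dict String Bool) (acc : List String) :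
    runB i d (PVItem.post n :: K) v acc = runB i d K v (acc ++ [n]) := by simp [runB]
lemma runB_pre_skip (i : List String) (d : List (String × List String)) (n : String) (K : List PVItem) (v : PySem.Dict String Bool) (acc : List String)
    (h : v.get? n = some true ∨ n ∈ i) :
    runB i d (PVItem.pre n :: K) v acc = runB i d K v acc := by
  rcases h with h | h <;> simp [runB, h]
lemma runB_pre_none (i : List String) (d : List (String × List String)) (n : String) (K : List PVItem) (v : PySem.Dict String Bool) (acc : List String)
    (h1 : ¬ v.get? n = some true) (hni : n ∉ i) (h2 : PySem.Dict.get? (PySem.Dict.mk d) n = none) :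
    runB i d (PVItem.pre n :: K) v acc = runB i d K v acc := by
  simp [runB, h1, hni]
  split <;> simp_all
lemma runB_pre_mark (i : List String) (d : List (String × List String)) (n : String) (K : List PVItem) (v : PySem.Dict String Bool) (acc : List String) (ds : List String)
    (h1 : ¬ v.get? n = some true) (hni : n ∉ i) (h2 : PySem.Dict.get? (PySem.Dict.mk d) n = some ds) :
    runB i d (PVItem.pre n :: K) v acc = runB i d (ds.map PVItem.pre ++ PVItem.post n :: K) (v.insert n true) acc := by
  simp [runB, h1, hni]
  split <;> simp_all
lemma goAList_mono_of (i : List String) (d : List (String × List String)) (fuel : Nat)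
    (hA : ∀ r v k, v.get? k = some true → (goA i d fuel r v).2.get? k = some true) :
    ∀ ds (v : PySem.Dict String Bool) k, v.get? k = some true → (goAList i d fuel ds v).2.get? k = some true := by
  intro ds
  induction ds with
  | nil => intro v k h; rw [goAList_nil]; exact h
  | cons x rest ihr => intro v k h; rw [goAList_cons]; exact ihr _ _ (hA _ _ _ h)

lemma goA_mono (i : List String) (d : List (String × List String)) :
    ∀ fuel r (v : PySem.Dict String Bool) k, v.get? k = some true → (goA i d fuel r v).2.get? k = some true := by
  intro fuel
  induction fuel with
  | zero => intro r v k h; rw [goA_zero]; exact h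
  | succ fuel ih =>
    intro r v k h
    by_cases hsk : v.get? r = some true ∨ r ∈ i
    · rw [goA_skip _ _ _ _ _ hsk]; exact h
    · push Not at hsk
      obtain ⟨h1, hni⟩ := hsk
      cases hm : PySem.Dict.get? (PySem.Dict.mk d) r with
      | none => rw [goA_dead _ _ _ _ _ h1 hni hm]; exact h
      | some ds =>
        rw [goA_mark _ _ _ _ _ _ h1 hni hm]
        refine goAList_mono_of i d fuel ih ds _ k ?_
        by_cases hk : k = r
        · subst hk; simp
        · simpa [PySem.Dict.get?_insert, hk] using h

lemma unvis_goA_le (i : List String) (d : List (String × List String)) (fuel : Nat) (r : String) (v : PySem.Dict String Bool) :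
    unvisA d (goA i d fuel r v).2 ≤ unvisA d v := by
  apply List.countP_mono_left
  intro a _ hq
  by_cases hv : v.get? a.1 = some true
  · have := goA_mono i d fuel r v a.1 hv
    simp [this] at hq
  · simp [hv]

lemma runB_simulates' (i : List String) (d : List (String × List String)) :
    ∀ fuel : Nat,
      (∀ (v : PySem.Dict String Bool) n, unvisA d v < fuel → ∀ K acc,
        runB i d (PVItem.pre n :: K) v acc =
          runB i d K (goA i d fuel n v).2 (acc ++ (goA i d fuel n v).1)) ∧
      (∀ ds (v : PySem.Dict String Bool), unvisA d v < fuel → ∀ K acc,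
        runB i d (ds.map PVItem.pre ++ K) v acc =
          runB i d K (goAList i d fuel ds v).2 (acc ++ (goAList i d fuel ds v).1)) := by
  intro fuel
  induction fuel with
  | zero => exact ⟨fun v n hlt => (Nat.not_lt_zero _ hlt).elim, fun ds v hlt => (Nat.not_lt_zero _ hlt).elim⟩
  | succ fuel ih =>
    have hE : ∀ (v : PySem.Dict String Bool) n, unvisA d v < fuel + 1 → ∀ K acc,
        runB i d (PVItem.pre n :: K) v acc =
          runB i d K (goA i d (fuel+1) n v).2 (acc ++ (goA i d (fuel+1) n v).1) := by
      intro v n hlt K acc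
      by_cases hsk : v.get? n = some true ∨ n ∈ i
      · rw [runB_pre_skip _ _ _ _ _ _ hsk, goA_skip _ _ _ _ _ hsk]; simp
      · push Not at hsk
        obtain ⟨h1, hni⟩ := hsk
        cases hm : PySem.Dict.get? (PySem.Dict.mk d) n with
        | none => rw [runB_pre_none _ _ _ _ _ _ h1 hni hm, goA_dead _ _ _ _ _ h1 hni hm]; simp
        | some ds =>
          rw [runB_pre_mark _ _ _ _ _ _ _ h1 hni hm, goA_mark _ _ _ _ _ _ h1 hni hm]
          have hlt1 : unvisA d (v.insert n true) < fuel := by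
            have := unvis_insert_lt d v n ds hm (by simp [h1])
            omega
          rw [ih.2 ds _ hlt1 (PVItem.post n :: K) acc, runB_post]
          simp
    refine ⟨hE, ?_⟩
    intro ds
    induction ds with
    | nil =>
      intro v hlt K acc
      rw [goAList_nil]; simp
    | cons x rest ihr =>
      intro v hlt K acc
      rw [goAList_cons]
      rw [show ((x :: rest).map PVItem.pre ++ K) = PVItem.pre x :: (rest.map PVItem.pre ++ K) from by simp]
      rw [hE v x hlt (rest.map PVItem.pre ++ K) acc]
      have hlt2 : unvisA d (goA i d (fuel+1) x v).2 < fuel + 1 :=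
        lt_of_le_of_lt (unvis_goA_le i d (fuel+1) x v) hlt
      rw [ihr _ hlt2 K _]
      simp

-- ===== VERDICT (by name: the statement is the Claim_ definition above) =====
theorem topological_order_from_root_spec : Claim_equal_topological_order_from_root := by
  intro inputs dependencies root visited _
  unfold Spec_topological_order_from_root topological_order_from_root topological_order_from_root_alt
  have hf : unvisA dependencies (PySem.Dict.mk visited) < dependencies.length + 1 := by
    unfold unvisA; exact Nat.lt_succ_of_le List.countP_le_length
  rw [(runB_simulates' inputs dependencies (dependencies.length + 1)).1 _ root hf [] [], runB_nil]
  simp
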